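-- pv_equiv track=rewrite | github.com/barthogenes/AdventOfCode2021 | adventofcode2021/sonar_sweep.py | sonar_sweep_part_2
-- ===== SOURCE A (Python) =====
-- def sonar_sweep_part_2(input: str):
--     val = float("inf")
--     increased_count = 0
--     lines = input.splitlines()
--     for i in range(len(lines) - 2):
--         num = int(lines[i]) + int(lines[i + 1]) + int(lines[i + 2])
--         if val < num:
--             increased_count += 1
--
--         val = num
--
--     return increased_count
-- ===== SOURCE B (Python) =====
-- def sonar_sweep_part_2(input: str):
--     lines = input.splitlines()
--     if len(lines) < 3:
--         return 0
--     nums = [int(line) for line in lines]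
--     return sum(1 for a, b in zip(nums, nums[3:]) if b > a)
-- ===== Notes on version B (the rewrite author's own statement) =====
-- stated objective: simpler
-- what changed: Replaces the running window-sum accumulator with the telescoping identity that a 3-window sum increases iff nums[i+3] > nums[i], counting those pairs over zip(nums, nums[3:]).
import Mathlib
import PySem

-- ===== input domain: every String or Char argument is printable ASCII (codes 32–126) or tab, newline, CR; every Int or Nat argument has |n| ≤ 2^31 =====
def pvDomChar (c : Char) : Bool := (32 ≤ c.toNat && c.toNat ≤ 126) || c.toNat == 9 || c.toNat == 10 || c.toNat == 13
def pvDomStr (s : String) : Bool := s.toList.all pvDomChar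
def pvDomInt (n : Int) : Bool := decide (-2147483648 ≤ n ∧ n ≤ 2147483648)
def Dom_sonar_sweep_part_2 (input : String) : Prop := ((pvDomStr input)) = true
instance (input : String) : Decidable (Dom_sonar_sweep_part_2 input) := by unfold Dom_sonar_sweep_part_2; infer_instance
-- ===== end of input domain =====

-- B drops A's running window-sum accumulator and instead counts indices where the
-- element three positions ahead exceeds the current one (the two shared window terms
-- cancel); objective: simpler.

-- ===== PORT A =====
-- val = float("inf") is ported as Option Int: none is the initial infinity, for which
-- the comparison val < num is false for every int num (exact for this program).
-- int(line) is PySem.Int.ofStr?; Pre_ excludes the inputs where it is none (ValueError).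
def sonar_sweep_part_2 (input : String) : Int :=
  let lines := PySem.Str.splitlines input
  let r := (PySem.List.pyRange 0 ((lines.length : Int) - 2) 1).foldl
    (fun (st : Option Int × Int) i =>
      let num := (PySem.Int.ofStr? (PySem.List.pyGetD lines i "")).getD 0
               + (PySem.Int.ofStr? (PySem.List.pyGetD lines (i + 1) "")).getD 0
               + (PySem.Int.ofStr? (PySem.List.pyGetD lines (i + 2) "")).getD 0
      (some num, if (match st.1 with | none => false | some v => v < num) then st.2 + 1 else st.2))
    (none, 0)
  r.2

-- ===== PORT B =====
def sonar_sweep_part_2_alt (input : String) : Int :=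
  let lines := PySem.Str.splitlines input
  if lines.length < 3 then 0
  else
    let nums := lines.map (fun l => (PySem.Int.ofStr? l).getD 0)
    ((nums.zip (nums.drop 3)).countP (fun p => p.2 > p.1) : Int)

-- ===== PRECONDITION & SPEC =====
-- Pre_ excludes exactly the inputs where the Python raises ValueError: with at least
-- 3 lines every line is passed to int(), so every line must parse as an integer.
def Pre_sonar_sweep_part_2 (input : String) : Prop :=
  (PySem.Str.splitlines input).length < 3 ∨
    ∀ l ∈ PySem.Str.splitlines input, (PySem.Int.ofStr? l).isSome
instance (input : String) : Decidable (Pre_sonar_sweep_part_2 input) := by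
  unfold Pre_sonar_sweep_part_2; infer_instance
def pvWitness_sonar_sweep_part_2 : String := "199\n200\n208\n210\n200\n207\n240\n269\n260\n263"
def Spec_sonar_sweep_part_2 (input : String) (out : Int) : Prop := out = sonar_sweep_part_2_alt input
instance (input : String) (out : Int) : Decidable (Spec_sonar_sweep_part_2 input out) := by unfold Spec_sonar_sweep_part_2; infer_instance

-- ===== CLAIM (what is proved, stated in full; the proofs are below) =====
def Claim_equal_sonar_sweep_part_2 : Prop := ∀ (input : String), Dom_sonar_sweep_part_2 input → Pre_sonar_sweep_part_2 input → Spec_sonar_sweep_part_2 input (sonar_sweep_part_2 input)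

-- ===== LEMMAS AND PROOFS =====
def pvParse (l : String) : Int := (PySem.Int.ofStr? l).getD 0
def pvW (lines : List String) (i : Int) : Int :=
  pvParse (PySem.List.pyGetD lines i "") + pvParse (PySem.List.pyGetD lines (i + 1) "")
    + pvParse (PySem.List.pyGetD lines (i + 2) "")
def pvStep (lines : List String) (st : Option Int × Int) (i : Int) : Option Int × Int :=
  (some (pvW lines i),
   if (match st.1 with | none => false | some v => v < pvW lines i) then st.2 + 1 else st.2)

theorem pvLoopA (lines : List String) (b : Int) :
    ∀ (m : Nat) (a c : Int), (b - a).toNat = m →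
      ((PySem.List.pyRange a b 1).foldl (pvStep lines) (some (pvW lines (a - 1)), c)).2
        = c + ((PySem.List.pyRange a b 1).countP
                 (fun i => decide (pvW lines (i - 1) < pvW lines i)) : Int) := by
  intro m
  induction m with
  | zero =>
    intro a c hm
    rw [PySem.List.pyRange_one_eq_nil (by omega)]
    simp
  | succ m ih =>
    intro a c hm
    rw [PySem.List.pyRange_one_cons (show a < b by omega)]
    rw [List.foldl_cons, List.countP_cons]
    have hstep : pvStep lines (some (pvW lines (a - 1)), c) a
        = (some (pvW lines a), if pvW lines (a - 1) < pvW lines a then c + 1 else c) := by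
      simp [pvStep]
    rw [hstep]
    have ha : a + 1 - 1 = a := by ring
    have h2 := ih (a + 1) (if pvW lines (a - 1) < pvW lines a then c + 1 else c) (by omega)
    rw [ha] at h2
    rw [h2]
    by_cases h : pvW lines (a - 1) < pvW lines a <;> simp [h] <;> push_cast <;> ring

theorem pvZipDrop (nums : List Int) :
    nums.zip (nums.drop 3)
      = (List.range (nums.length - 3)).map (fun k => (nums.getD k 0, nums.getD (k + 3) 0)) := by
  apply List.ext_getElem
  · simp [List.length_zip]
  · intro k h1 h2
    have hk : k < nums.length - 3 := by simp [List.length_zip] at h1; omega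
    simp only [List.getElem_zip, List.getElem_map, List.getElem_range, List.getElem_drop]
    rw [List.getD_eq_getElem _ _ (show k < nums.length by omega),
        List.getD_eq_getElem _ _ (show k + 3 < nums.length by omega)]
    have h34 : 3 + k = k + 3 := by omega
    simp [h34]

theorem pvW_eq_getD (lines : List String) (i : Int) :
    pvW lines i = PySem.List.pyGetD (lines.map pvParse) i 0
      + PySem.List.pyGetD (lines.map pvParse) (i + 1) 0
      + PySem.List.pyGetD (lines.map pvParse) (i + 2) 0 := by
  have h0 : (0 : Int) = pvParse "" := rfl
  rw [pvW]
  rw [show (PySem.List.pyGetD (lines.map pvParse) i 0) = pvParse (PySem.List.pyGetD lines i "") from by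
        rw [h0]; exact PySem.List.pyGetD_map pvParse lines i ""]
  rw [show (PySem.List.pyGetD (lines.map pvParse) (i+1) 0) = pvParse (PySem.List.pyGetD lines (i+1) "") from by
        rw [h0]; exact PySem.List.pyGetD_map pvParse lines (i+1) ""]
  rw [show (PySem.List.pyGetD (lines.map pvParse) (i+2) 0) = pvParse (PySem.List.pyGetD lines (i+2) "") from by
        rw [h0]; exact PySem.List.pyGetD_map pvParse lines (i+2) ""]

theorem pvCond (lines : List String) (k : Nat) :
    (decide (pvW lines ((1:Int) + (k:Int) - 1) < pvW lines ((1:Int) + (k:Int))))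
      = decide ((lines.map pvParse).getD (k+3) 0 > (lines.map pvParse).getD k 0) := by
  apply Bool.decide_congr
  rw [show (1:Int) + (k:Int) - 1 = ((k:Nat):Int) from by push_cast; ring,
      show (1:Int) + (k:Int) = (((k+1:Nat)):Int) from by push_cast; ring,
      pvW_eq_getD, pvW_eq_getD]
  rw [show ((k:Int)) + 1 = (((k+1:Nat)):Int) from by push_cast; ring,
      show ((k:Int)) + 2 = (((k+2:Nat)):Int) from by push_cast; ring,
      show (((k+1:Nat)):Int) + 1 = (((k+2:Nat)):Int) from by push_cast; ring,
      show (((k+1:Nat)):Int) + 2 = (((k+3:Nat)):Int) from by push_cast; ring]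
  simp only [PySem.List.pyGetD_natCast]
  omega

theorem pvMain (lines : List String) :
    ((PySem.List.pyRange 0 ((lines.length : Int) - 2) 1).foldl (pvStep lines) (none, 0)).2
      = if lines.length < 3 then 0
        else (((lines.map pvParse).zip ((lines.map pvParse).drop 3)).countP
                (fun p => p.2 > p.1) : Int) := by
  by_cases h3 : lines.length < 3
  · rw [if_pos h3, PySem.List.pyRange_one_eq_nil (by omega)]
    rfl
  · rw [if_neg h3]
    rw [PySem.List.pyRange_one_cons (show (0:Int) < (lines.length : Int) - 2 by omega)]
    rw [List.foldl_cons]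
    have h1 : pvStep lines (none, 0) 0 = (some (pvW lines 0), 0) := by simp [pvStep]
    rw [h1, show (some (pvW lines 0), (0:Int)) = (some (pvW lines (1 - 1)), (0:Int)) from rfl]
    rw [show ((0:Int) + 1) = 1 from by ring]
    rw [pvLoopA lines ((lines.length : Int) - 2) ((lines.length : Int) - 2 - 1).toNat 1 0 rfl]
    rw [pvZipDrop (lines.map pvParse), List.countP_map]
    rw [PySem.List.pyRange_one 1 ((lines.length : Int) - 2), List.countP_map]
    have hm : (((lines.length : Int) - 2) - 1).toNat = (lines.map pvParse).length - 3 := by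
      simp; omega
    rw [hm, zero_add]
    congr 1
    apply List.countP_congr
    intro k _
    simp only [Function.comp_apply, pvCond lines k]

-- ===== VERDICT (by name: the statement is the Claim_ definition above) =====
theorem sonar_sweep_part_2_spec : Claim_equal_sonar_sweep_part_2 := by
  intro input _ _
  unfold Spec_sonar_sweep_part_2
  exact pvMain (PySem.Str.splitlines input)
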